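-- pv_equiv track=rewrite | github.com/breinbaas/leveelogic_old | leveelogic/helpers.py | sti_geometry_helper
-- ===== SOURCE A (Python) =====
-- from typing import List, Tuple
--
-- def sti_geometry_helper(top: List[int], bottom: List[int]) -> List[int]:
--     polyline = top + bottom[::-1]
--     result = []
--
--     # remove from the beginning and end if they are the same but save the last removed idx
--     for i in range(len(polyline)):
--         if polyline[0] == polyline[-1]:
--             result = [polyline[0]]
--             polyline.pop(0)
--             polyline.pop(-1)
--         else:
--             if len(result) > 0:
--                 for p in polyline:
--                     if p != polyline[-1]:
--                         result.append(p)
--                     else: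
--                         result.append(p)
--                         break
--                 return result
--
--     # no result, lets try it the other way
--     polyline = top[::-1] + bottom
--     for i in range(len(polyline)):
--         if polyline[0] == polyline[-1]:
--             result = [polyline[0]]
--             polyline.pop(0)
--             polyline.pop(-1)
--         else:
--             if len(result) > 0:
--                 for p in polyline:
--                     if p != polyline[-1]:
--                         result.append(p)
--                     else:
--                         result.append(p)
--                         break
--                 return result[::-1]
--
--     # no result, all unique points
--     return top + bottom[::-1]
-- ===== SOURCE B (Python) =====
-- from typing import List
--
--
-- def sti_geometry_helper(top: List[int], bottom: List[int]) -> List[int]: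
--     polyline = top + bottom[::-1]
--     if polyline and polyline[0] == polyline[-1]:
--         return _trim_inner(polyline)
--     polyline = top[::-1] + bottom
--     if polyline and polyline[0] == polyline[-1]:
--         return _trim_inner(polyline)[::-1]
--     return top + bottom[::-1]
--
--
-- def _trim_inner(p):
--     # two-pointer trim of matching ends, then one slice + one index scan
--     i, j = 0, len(p) - 1
--     while i < j and p[i] == p[j]:
--         i += 1
--         j -= 1
--     seg = p[i:j + 1]
--     k = seg.index(seg[-1])
--     return [p[i - 1]] + seg[:k + 1]
-- ===== Notes on version B (the rewrite author's own statement) =====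
-- stated objective: faster
-- what changed: Replaces the O(n^2) loop that repeatedly pops both ends of the polyline (pop(0) shifts the whole list each step) with a two-pointer scan from both ends followed by a single slice and one index() scan.
import Mathlib
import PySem

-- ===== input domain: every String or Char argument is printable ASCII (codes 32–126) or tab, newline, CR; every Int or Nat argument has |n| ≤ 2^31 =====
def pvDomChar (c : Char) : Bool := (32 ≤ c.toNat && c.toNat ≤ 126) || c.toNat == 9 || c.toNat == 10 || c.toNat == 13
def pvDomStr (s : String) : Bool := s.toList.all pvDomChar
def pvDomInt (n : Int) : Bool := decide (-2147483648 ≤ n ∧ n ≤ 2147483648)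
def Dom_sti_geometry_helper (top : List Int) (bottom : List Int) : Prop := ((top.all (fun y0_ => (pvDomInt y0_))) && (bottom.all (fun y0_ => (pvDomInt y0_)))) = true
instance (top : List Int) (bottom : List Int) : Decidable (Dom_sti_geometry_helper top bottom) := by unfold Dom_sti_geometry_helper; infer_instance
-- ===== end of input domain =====

-- B replaces A's quadratic pop-both-ends trimming loop by a two-pointer scan plus a single slice (return value only; neither version's observable behaviour mutates the arguments).

-- ===== PORT A =====

-- the inner `for p in polyline: ... append, break when p == polyline[-1]` loop (polyline[-1] is constant there)
def innerLoopA (polyline : List Int) (last : Int) (result : List Int) : List Int :=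
  match polyline with
  | [] => result
  | p :: rest => if p ≠ last then innerLoopA rest last (result ++ [p]) else result ++ [p]

-- the `for i in range(len(polyline))` trimming loop; fuel = the range length.
-- none = this Python iteration raises IndexError (polyline[0]/[-1] on the emptied list, or pop(-1) after
-- pop(0) emptied it); Sum.inl r = early `return r`; Sum.inr result = loop finished, `result` carried on.
def trimLoopA : Nat → List Int → List Int → Option ((List Int) ⊕ (List Int))
  | 0, _, result => some (Sum.inr result)
  | fuel+1, polyline, result =>
    match PySem.List.pyGet? polyline 0, PySem.List.pyGet? polyline (-1) with
    | some h, some l =>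
      if h = l then
        if polyline.length = 1 then none   -- pop(0) empties it, pop(-1) raises
        else trimLoopA fuel polyline.tail.dropLast [h]
      else
        if result = [] then trimLoopA fuel polyline result
        else some (Sum.inl (innerLoopA polyline l result))
    | _, _ => none

def sti_geometry_helper (top : List Int) (bottom : List Int) : List Int :=
  let p := top ++ bottom.reverse
  match trimLoopA p.length p [] with
  | some (Sum.inl r) => r
  | some (Sum.inr result) =>
    let q := top.reverse ++ bottom
    match trimLoopA q.length q result with
    | some (Sum.inl r) => r.reverse
    | some (Sum.inr _) => top ++ bottom.reverse
    | none => []                     -- the Python raises IndexError here: outside Pre_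
  | none => []                       -- the Python raises IndexError here: outside Pre_

-- ===== PORT B =====

-- `while i < j and p[i] == p[j]: i += 1; j -= 1` (both indices stay in range, so p[i]?/p[j]? is exact)
def twoPointer (p : List Int) (i j : Nat) : Nat × Nat :=
  if h : i < j ∧ p[i]? = p[j]? then twoPointer p (i+1) (j-1) else (i, j)
termination_by j - i
decreasing_by omega

def trimInnerB (p : List Int) : List Int :=
  let ij := twoPointer p 0 (p.length - 1)
  let sg := PySem.List.slice p (some (ij.1 : Int)) (some ((ij.2 : Int) + 1))
  match PySem.List.pyGet? sg (-1) with
  | none => []                       -- seg[-1] raises IndexError in Python B: outside Pre_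
  | some last =>
    match PySem.List.index? sg last with
    | none => []                     -- unreachable: last is a member of sg
    | some k =>
      (PySem.List.pyGet? p ((ij.1 : Int) - 1)).toList ++ PySem.List.slice sg none (some ((k : Int) + 1))

def sti_geometry_helper_alt (top : List Int) (bottom : List Int) : List Int :=
  let p := top ++ bottom.reverse
  if p ≠ [] ∧ PySem.List.pyGet? p 0 = PySem.List.pyGet? p (-1) then trimInnerB p
  else
    let q := top.reverse ++ bottom
    if q ≠ [] ∧ PySem.List.pyGet? q 0 = PySem.List.pyGet? q (-1) then (trimInnerB q).reverse
    else top ++ bottom.reverse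

-- ===== PRECONDITION & SPEC =====

-- A raises IndexError exactly when the trimming loop it enters consumes the whole polyline, i.e. when the
-- entered polyline (top+bottom[::-1]; else top[::-1]+bottom) is a non-empty palindrome; Pre_ excludes exactly those inputs.
def Pre_sti_geometry_helper (top : List Int) (bottom : List Int) : Prop :=
  (¬ ((top ++ bottom.reverse) ≠ [] ∧ (top ++ bottom.reverse)[0]? = (top ++ bottom.reverse).getLast? ∧ (top ++ bottom.reverse).reverse = top ++ bottom.reverse)) ∧
  (¬ ((top ++ bottom.reverse) ≠ [] ∧ (top ++ bottom.reverse)[0]? ≠ (top ++ bottom.reverse).getLast? ∧ (top.reverse ++ bottom)[0]? = (top.reverse ++ bottom).getLast? ∧ (top.reverse ++ bottom).reverse = top.reverse ++ bottom))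

instance (top : List Int) (bottom : List Int) : Decidable (Pre_sti_geometry_helper top bottom) := by
  unfold Pre_sti_geometry_helper; infer_instance

def pvWitness_sti_geometry_helper : List Int × List Int := ([1, 2, 3], [1, 5])

def Spec_sti_geometry_helper (top : List Int) (bottom : List Int) (out : List Int) : Prop := out = sti_geometry_helper_alt top bottom
instance (top : List Int) (bottom : List Int) (out : List Int) : Decidable (Spec_sti_geometry_helper top bottom out) := by unfold Spec_sti_geometry_helper; infer_instance

-- ===== CLAIM (what is proved, stated in full; the proofs are below) =====
def Claim_equal_sti_geometry_helper : Prop := ∀ (top : List Int) (bottom : List Int), Dom_sti_geometry_helper top bottom → Pre_sti_geometry_helper top bottom → Spec_sti_geometry_helper top bottom (sti_geometry_helper top bottom)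

-- ===== LEMMAS AND PROOFS =====

-- structural core of the trimming: peel equal ends, remembering the value peeled last
def trimCore (m : Int) (p : List Int) : Option (Int × List Int) :=
  if _h : p.length ≤ 1 then none
  else if p[0]? = p.getLast? then trimCore p.head! p.tail.dropLast else some (m, p)
termination_by p.length
decreasing_by simp [List.length_dropLast, List.length_tail]; omega

-- the segment p[i:j+1]
def seg (p : List Int) (i j : Nat) : List Int := (p.take (j+1)).drop i

lemma take_succ_eq (p : List Int) (j : Nat) (hj : j < p.length) : p.take (j+1) = p.take j ++ [p[j]!] := by
  rw [List.take_add_one]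
  simp [List.getElem?_eq_getElem hj, getElem!_pos p j hj]

lemma seg_decomp (p : List Int) (i j : Nat) (hij : i < j) (hj : j < p.length) :
    seg p i j = p[i]! :: seg p (i+1) (j-1) ++ [p[j]!] := by
  have hi : i < p.length := lt_trans hij hj
  unfold seg
  rw [show j - 1 + 1 = j from by omega, take_succ_eq p j hj,
      List.drop_append_of_le_length (by simp; omega),
      List.drop_eq_getElem_cons (by simp; omega)]
  simp [List.getElem_take, getElem!_pos p i hi]

lemma seg_singleton (p : List Int) (j : Nat) (hj : j < p.length) : seg p j j = [p[j]!] := by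
  unfold seg
  rw [take_succ_eq p j hj, List.drop_append_of_le_length (by simp; omega),
      List.drop_eq_nil_of_le (by simp)]
  simp

lemma seg_getLast? (p : List Int) (i j : Nat) (hij : i < j) (hj : j < p.length) :
    (seg p i j).getLast? = some (p[j]!) := by
  rw [seg_decomp p i j hij hj, List.getLast?_concat]

lemma nonpal_len2 {l : List Int} (h : l.reverse ≠ l) : 2 ≤ l.length := by
  match l with
  | [] => exact absurd rfl h
  | [x] => exact absurd rfl h
  | x :: y :: rest => simp

-- A's inner copy loop is `take` up to (and including) the first occurrence of `last`
lemma innerLoopA_char (seg' : List Int) : ∀ (last : Int) (acc : List Int) (k : Nat),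
    PySem.List.index? seg' last = some k →
    innerLoopA seg' last acc = acc ++ seg'.take (k+1) := by
  induction seg' with
  | nil => intro last acc k h; simp [PySem.List.index?] at h
  | cons x rest ih =>
    intro last acc k h
    by_cases hx : x = last
    · subst hx
      rw [PySem.List.index?_cons_self] at h
      obtain rfl : k = 0 := by injection h with h'; omega
      simp [innerLoopA]
    · rw [PySem.List.index?_cons_of_ne rest hx] at h
      obtain ⟨k', hk', rfl⟩ := Option.map_eq_some_iff.mp h
      simp only [innerLoopA]
      rw [if_pos (show x ≠ last from hx), ih last (acc ++ [x]) k' hk']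
      simp [List.take_succ_cons]

-- the trimming loop does nothing while the ends differ and result is empty
lemma trimLoopA_noop (fuel : Nat) : ∀ (p : List Int), p ≠ [] → p[0]? ≠ p.getLast? →
    trimLoopA fuel p [] = some (Sum.inr []) := by
  induction fuel with
  | zero => intro p _ _; rfl
  | succ n ih =>
    intro p hne hne2
    obtain ⟨x, rest, rfl⟩ := List.exists_cons_of_ne_nil hne
    have h0 : PySem.List.pyGet? (x :: rest) 0 = some x := by simp
    have hl : PySem.List.pyGet? (x :: rest) (-1) = (x :: rest).getLast? := PySem.List.pyGet?_neg_one _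
    obtain ⟨l, hl'⟩ : ∃ l, (x :: rest).getLast? = some l := by
      cases h : (x :: rest).getLast? with
      | none => simp [List.getLast?_eq_none_iff] at h
      | some l => exact ⟨l, rfl⟩
    simp only [trimLoopA, h0, hl, hl']
    have : ¬ x = l := by simp_all
    simp only [if_neg this]
    exact ih _ hne hne2

-- A's trimming loop, once result is a singleton, is trimCore followed by the inner copy loop
lemma trimLoopA_char (fuel : Nat) : ∀ (p : List Int) (m : Int), p.length < fuel →
    trimLoopA fuel p [m] =
      (match trimCore m p with
       | none => none
       | some (m', p') => some (Sum.inl (innerLoopA p' p'.getLast! [m']))) := by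
  induction fuel with
  | zero => intro p m h; omega
  | succ n ih =>
    intro p m h
    match p with
    | [] =>
      rw [trimCore]
      simp [trimLoopA, PySem.List.pyGet?]
    | [x] =>
      rw [trimCore]
      simp [trimLoopA, PySem.List.pyGet?_neg_one]
    | x :: y :: rest =>
      obtain ⟨l, hl⟩ : ∃ l, (x :: y :: rest).getLast? = some l := by
        cases hgl : (x :: y :: rest).getLast? with
        | none => simp [List.getLast?_eq_none_iff] at hgl
        | some l => exact ⟨l, rfl⟩
      have h0 : PySem.List.pyGet? (x :: y :: rest) 0 = some x := by
        simp [PySem.List.pyGet?_zero]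
      have hm1 : PySem.List.pyGet? (x :: y :: rest) (-1) = some l := by
        rw [PySem.List.pyGet?_neg_one, hl]
      by_cases hxl : x = l
      · have hr : trimCore m (x :: y :: rest) = trimCore x ((y :: rest).dropLast) := by
          rw [trimCore, dif_neg (show ¬(x :: y :: rest).length ≤ 1 by simp),
              if_pos (by rw [hl]; simp [hxl])]
          rfl
        simp only [trimLoopA, h0, hm1]
        rw [if_pos hxl, if_neg (show ¬(x :: y :: rest).length = 1 by simp)]
        rw [ih _ x (by simp at h ⊢; omega), hr]
        rfl
      · simp only [trimLoopA, h0, hm1]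
        rw [if_neg hxl, if_neg (show ¬([m] : List Int) = [] by simp)]
        rw [trimCore, dif_neg (show ¬(x :: y :: rest).length ≤ 1 by simp),
            if_neg (by rw [hl]; simp [hxl])]
        have hl2 : (y :: rest).getLast? = some l := by
          rw [← List.getLast?_cons_cons]; exact hl
        have hg : (y :: rest).getLast (by simp) = l := by
          have h2 := List.getLast?_eq_some_getLast (l := y :: rest) (by simp)
          rw [hl2] at h2
          exact (Option.some_inj.mp h2).symm
        simp [List.getLast!, hg]

-- B's two-pointer scan computes exactly trimCore on the segment it brackets
lemma twoPointer_core (n : Nat) : ∀ (p : List Int) (i j : Nat), j - i = n → 1 ≤ i → i ≤ j → j < p.length →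
    (seg p i j).reverse ≠ seg p i j →
    ∃ i' j', twoPointer p i j = (i', j') ∧ 1 ≤ i' ∧ i ≤ i' ∧ i' < j' ∧ j' ≤ j ∧
      trimCore (p[i-1]!) (seg p i j) = some (p[i'-1]!, seg p i' j') ∧ p[i']? ≠ p[j']? := by
  induction n using Nat.strong_induction_on with
  | _ n ih =>
    intro p i j hn h1 hij hj hnp
    rcases Nat.lt_or_ge i j with hlt | hge
    · -- i < j
      have hi : i < p.length := lt_trans hlt hj
      have hdec := seg_decomp p i j hlt hj
      have hval : (p[i]? = p[j]?) ↔ (p[i]! = p[j]!) := by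
        simp [List.getElem?_eq_getElem hi, List.getElem?_eq_getElem hj,
              getElem!_pos p i hi, getElem!_pos p j hj]
      by_cases heq : p[i]! = p[j]!
      · -- matching ends: one two-pointer step, one trimCore step
        have hseglen : 2 ≤ (seg p i j).length := by
          rw [hdec]; simp
        have htc : trimCore (p[i-1]!) (seg p i j) = trimCore (p[i]!) (seg p (i+1) (j-1)) := by
          rw [trimCore, dif_neg (by omega),
              if_pos (by rw [hdec, List.getLast?_concat, heq]; rfl)]
          rw [hdec]
          simp
        have htw : twoPointer p i j = twoPointer p (i+1) (j-1) := by
          rw [twoPointer, dif_pos ⟨hlt, hval.mpr heq⟩]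
        -- the inner segment cannot be empty …
        have hinner : i + 1 ≤ j - 1 := by
          by_contra hc
          have hji : j = i + 1 := by omega
          apply hnp
          rw [hdec, heq]
          have : seg p (i+1) (j-1) = [] := by
            unfold seg
            apply List.drop_eq_nil_of_le
            simp; omega
          rw [this]
          simp
        -- … nor a palindrome
        have hnp2 : (seg p (i+1) (j-1)).reverse ≠ seg p (i+1) (j-1) := by
          intro hpal
          apply hnp
          rw [hdec, heq]
          simp [List.reverse_append, hpal]
        obtain ⟨i', j', ha, hb, hc', hd, he, hf, hg⟩ :=
          ih (j - 1 - (i+1)) (by omega) p (i+1) (j-1) rfl (by omega) hinner (by omega) hnp2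
        refine ⟨i', j', ?_, hb, by omega, hd, by omega, ?_, hg⟩
        · rw [htw, ha]
        · rw [htc]
          rw [show i + 1 - 1 = i from by omega] at hf
          exact hf
      · -- mismatching ends: both stop here
        have hstop : twoPointer p i j = (i, j) := by
          rw [twoPointer, dif_neg (fun hc => heq (hval.mp hc.2))]
        refine ⟨i, j, hstop, h1, le_refl i, hlt, le_refl j, ?_, ?_⟩
        · rw [trimCore, dif_neg (by rw [hdec]; simp),
              if_neg (by
                rw [hdec, List.getLast?_concat]
                intro hcon
                exact heq (by
                  have : some p[i]! = some p[j]! := by rw [← hcon]; rfl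
                  exact Option.some_inj.mp this))]
        · exact fun hc => heq (hval.mp hc)
    · -- i = j: the segment is a one-element palindrome, contradiction
      have hij' : i = j := by omega
      subst hij'
      exact absurd (by rw [seg_singleton p i hj]; rfl) hnp

-- one entered phase: A's trimming loop returns exactly B's trimmed segment
lemma phase_eq (p : List Int) (hne : p ≠ []) (he : p[0]? = p.getLast?) (hnp : p.reverse ≠ p) :
    trimLoopA p.length p [] = some (Sum.inl (trimInnerB p)) := by
  -- the polyline decomposes as x :: inner ++ [x]
  have hlen1 : 1 ≤ p.length := by
    cases p with
    | nil => exact absurd rfl hne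
    | cons a l => simp
  have hlen2 : 2 ≤ p.length := nonpal_len2 hnp
  have hx : p[0]? = some p[0]! := by
    rw [List.getElem?_eq_getElem (by omega), getElem!_pos p 0 (by omega)]
  have hgl : p.getLast? = some (p[p.length-1]!) := by
    rw [List.getLast?_eq_getElem?, List.getElem?_eq_getElem (by omega),
        getElem!_pos p (p.length-1) (by omega)]
  have hxl : p[0]! = p[p.length-1]! := by
    have := he; rw [hx, hgl] at this; exact Option.some_inj.mp this
  have hpseg : seg p 0 (p.length - 1) = p := by
    unfold seg
    rw [show p.length - 1 + 1 = p.length from by omega]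
    simp
  have hdec : p = p[0]! :: seg p 1 (p.length - 2) ++ [p[p.length-1]!] := by
    conv_lhs => rw [← hpseg, seg_decomp p 0 (p.length - 1) (by omega) (by omega)]
    rw [show (0:Nat) + 1 = 1 from rfl, show p.length - 1 - 1 = p.length - 2 from by omega]
  -- the inner segment is again non-palindromic (so in particular has ≥ 2 elements)
  have hinnp : (seg p 1 (p.length - 2)).reverse ≠ seg p 1 (p.length - 2) := by
    intro hpal
    apply hnp
    rw [hdec]
    simp [List.reverse_append, hpal, hxl]
  have hinlen : (seg p 1 (p.length - 2)).length = p.length - 2 := by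
    unfold seg
    rw [show p.length - 2 + 1 = p.length - 1 from by omega]
    simp
    omega
  have hlen4 : 4 ≤ p.length := by
    have := nonpal_len2 hinnp
    omega
  -- two-pointer / trimCore correspondence on the inner segment
  obtain ⟨i', j', htp, hb1, hb2, hb3, hb4, hcore, hmis⟩ :=
    twoPointer_core (p.length - 2 - 1) p 1 (p.length - 2) rfl le_rfl (by omega) (by omega) hinnp
  have hi'len : i' < p.length := by omega
  have hj'len : j' < p.length := by omega
  -- A's loop: one trimming step, then the characterisation
  have htail : p.tail.dropLast = seg p 1 (p.length - 2) := by
    unfold seg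
    rw [show p.length - 2 + 1 = p.length - 1 from by omega, List.drop_take]
    rw [← List.drop_one, List.dropLast_eq_take]
    simp
  have h0 : PySem.List.pyGet? p 0 = some p[0]! := by
    rw [PySem.List.pyGet?_zero, hx]
  have hm1 : PySem.List.pyGet? p (-1) = some p[0]! := by
    rw [PySem.List.pyGet?_neg_one, hgl, hxl]
  obtain ⟨k0, hk0⟩ : ∃ k0, p.length = k0 + 1 := ⟨p.length - 1, by omega⟩
  have hne1 : ¬ p.length = 1 := by omega
  have hA : trimLoopA p.length p [] = trimLoopA k0 p.tail.dropLast [p[0]!] := by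
    rw [hk0]
    simp [trimLoopA, h0, hm1, hne1]
  rw [hA, htail, trimLoopA_char k0 _ _ (by rw [hinlen]; omega), hcore]
  -- B's two-pointer scan takes the same first step
  have hc2 : p[0]? = p[p.length - 1]? := by
    rw [← List.getLast?_eq_getElem?]; exact he
  have htp0 : twoPointer p 0 (p.length - 1) = (i', j') := by
    rw [twoPointer, dif_pos ⟨show 0 < p.length - 1 from by omega, hc2⟩,
        show p.length - 1 - 1 = p.length - 2 from by omega, show (0 + 1 : Nat) = 1 from rfl]
    exact htp
  -- the segment B slices out
  have hgl' : (seg p i' j').getLast? = some (p[j']!) := seg_getLast? p i' j' hb3 hj'len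
  have hmem : p[j']! ∈ seg p i' j' := by
    rw [seg_decomp p i' j' hb3 hj'len]
    simp
  obtain ⟨k, hk⟩ : ∃ k, PySem.List.index? (seg p i' j') p[j']! = some k := by
    have := (PySem.List.index?_isSome_iff (seg p i' j') p[j']!).mpr hmem
    exact Option.isSome_iff_exists.mp this
  have hslice : PySem.List.slice p (some (i' : Int)) (some ((j' : Int) + 1)) = seg p i' j' := by
    rw [show ((j' : Int) + 1) = ((j' + 1 : Nat) : Int) from by push_cast; ring,
        PySem.List.slice_natCast]
    unfold seg
    rw [List.drop_take]
  have hB : trimInnerB p = [p[i'-1]!] ++ (seg p i' j').take (k + 1) := by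
    unfold trimInnerB
    simp only [htp0]
    simp only [hslice, PySem.List.pyGet?_neg_one, hgl']
    simp only [hk]
    rw [show ((i' : Int) - 1) = ((i' - 1 : Nat) : Int) from by omega,
        PySem.List.pyGet?_natCast,
        List.getElem?_eq_getElem (show i' - 1 < p.length from by omega),
        getElem!_pos p (i' - 1) (show i' - 1 < p.length from by omega),
        show ((k : Int) + 1) = ((k + 1 : Nat) : Int) from by push_cast; ring,
        PySem.List.slice_to_natCast]
    rfl
  rw [hB]
  -- and A's inner copy loop produces exactly that list
  have hlast : (seg p i' j').getLast! = p[j']! := List.getLast!_of_getLast? hgl'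
  have hinner := innerLoopA_char (seg p i' j') p[j']! [p[i'-1]!] k hk
  simp only [hlast, hinner]

-- ===== VERDICT (by name: the statement is the Claim_ definition above) =====
theorem sti_geometry_helper_spec : Claim_equal_sti_geometry_helper := by
  intro top bottom _hdom hpre
  unfold Spec_sti_geometry_helper
  obtain ⟨hpre1, hpre2⟩ := hpre
  by_cases hp : (top ++ bottom.reverse) = []
  · obtain ⟨ht, hb⟩ := List.append_eq_nil_iff.mp hp
    rw [List.reverse_eq_nil_iff] at hb
    subst ht; subst hb
    rfl
  · by_cases hx : (top ++ bottom.reverse)[0]? = (top ++ bottom.reverse).getLast?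
    · have hnp : (top ++ bottom.reverse).reverse ≠ top ++ bottom.reverse := by
        intro hpal; exact hpre1 ⟨hp, hx, hpal⟩
      unfold sti_geometry_helper sti_geometry_helper_alt
      dsimp only
      rw [phase_eq _ hp hx hnp,
          if_pos ⟨hp, by rw [PySem.List.pyGet?_zero, PySem.List.pyGet?_neg_one]; exact hx⟩]
    · have hq : (top.reverse ++ bottom) ≠ [] := by
        simp only [ne_eq, List.append_eq_nil_iff, List.reverse_eq_nil_iff] at hp ⊢
        tauto
      unfold sti_geometry_helper sti_geometry_helper_alt
      dsimp only
      rw [trimLoopA_noop _ _ hp hx,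
          if_neg (by
            intro ⟨_, hc⟩
            rw [PySem.List.pyGet?_zero, PySem.List.pyGet?_neg_one] at hc
            exact hx hc)]
      dsimp only
      by_cases hqx : (top.reverse ++ bottom)[0]? = (top.reverse ++ bottom).getLast?
      · have hnp2 : (top.reverse ++ bottom).reverse ≠ top.reverse ++ bottom := by
          intro hpal; exact hpre2 ⟨hp, hx, hqx, hpal⟩
        rw [phase_eq _ hq hqx hnp2,
            if_pos ⟨hq, by rw [PySem.List.pyGet?_zero, PySem.List.pyGet?_neg_one]; exact hqx⟩]
      · rw [trimLoopA_noop _ _ hq hqx,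
            if_neg (by
              intro ⟨_, hc⟩
              rw [PySem.List.pyGet?_zero, PySem.List.pyGet?_neg_one] at hc
              exact hqx hc)]
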